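-- pv_equiv track=rewrite | github.com/softlab-unimore/time2feat | t2f/extraction/extractor.py | get_balanced_job
-- ===== SOURCE A (Python) =====
-- def get_balanced_job(number_pool, number_job):
--     """ Define number of records to assign to each processor """
--     list_num_job = []
--     if number_job <= number_pool:
--         for i in range(number_job):
--             list_num_job.append(1)
--     else:
--         for i in range(number_pool):
--             list_num_job.append(int(number_job / number_pool))
--         for i in range(number_job % number_pool):
--             list_num_job[i] = list_num_job[i] + 1
--
--     return list_num_job
-- ===== SOURCE B (Python) =====
-- def get_balanced_job(number_pool, number_job):
--     """ Define number of records to assign to each processor """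
--     if number_job <= number_pool:
--         return [1] * number_job
--     # Round-robin view: worker i serves jobs i, i+pool, i+2*pool, ...,
--     # so its count is the ceiling of (number_job - i) / number_pool.
--     return [-(-(number_job - i) // number_pool) for i in range(number_pool)]
-- ===== Notes on version B (the rewrite author's own statement) =====
-- stated objective: alternative
-- what changed: Replaces A's populate-then-bump two-loop mutation with a per-worker closed form: worker i's count is the ceiling of (number_job - i)/number_pool (round-robin view), built in one comprehension with no divmod/remainder bump.
-- outside the precondition, e.g. on get_balanced_job(0, 5): A raises ZeroDivisionError, B returns []
import Mathlib
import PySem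

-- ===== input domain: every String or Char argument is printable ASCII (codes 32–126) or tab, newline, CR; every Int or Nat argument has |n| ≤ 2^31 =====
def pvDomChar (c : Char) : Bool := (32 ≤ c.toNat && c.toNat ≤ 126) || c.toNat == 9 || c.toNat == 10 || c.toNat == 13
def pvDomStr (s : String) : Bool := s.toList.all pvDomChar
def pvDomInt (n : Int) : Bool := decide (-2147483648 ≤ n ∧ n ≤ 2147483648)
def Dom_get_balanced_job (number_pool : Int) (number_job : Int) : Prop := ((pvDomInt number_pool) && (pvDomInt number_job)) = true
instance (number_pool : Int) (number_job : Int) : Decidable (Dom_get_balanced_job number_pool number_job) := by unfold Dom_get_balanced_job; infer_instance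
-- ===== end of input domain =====

-- B replaces A's populate-then-increment pair of loops with a per-worker ceiling
-- closed form (round-robin view); objective: alternative algorithm of the same cost.


-- ===== PORT A =====
-- 'int(number_job / number_pool)' is float division then truncation toward zero, which on
-- the Dom bound |n| ≤ 2^31 is exactly Int.tdiv (truncating division): the float quotient's
-- rounding error (≤ |q|·2⁻⁵³) is smaller than the gap 1/|pool| to the next integer.
def get_balanced_job (number_pool : Int) (number_job : Int) : List Int :=
  if number_job ≤ number_pool then
    (PySem.List.pyRange 0 number_job 1).foldl (fun acc _ => acc ++ [(1 : Int)]) []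
  else
    let l1 := (PySem.List.pyRange 0 number_pool 1).foldl
      (fun acc _ => acc ++ [number_job.tdiv number_pool]) []
    -- 'list_num_job[i] = list_num_job[i] + 1' : i ∈ range(r) is a valid nonnegative index
    (PySem.List.pyRange 0 (PySem.Int.mod number_job number_pool) 1).foldl
      (fun acc i => acc.set i.toNat (acc.getD i.toNat 0 + 1)) l1

-- ===== PORT B =====
-- '-(-(number_job - i) // number_pool)' is Python ceiling division, ported literally.
def get_balanced_job_alt (number_pool : Int) (number_job : Int) : List Int :=
  if number_job ≤ number_pool then
    List.replicate number_job.toNat 1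
  else
    (PySem.List.pyRange 0 number_pool 1).map
      (fun i => -(PySem.Int.floordiv (-(number_job - i)) number_pool))

-- ===== PRECONDITION & SPEC =====
-- Pre_ excludes only number_pool = 0 with number_pool < number_job, where A raises ZeroDivisionError.
def Pre_get_balanced_job (number_pool : Int) (number_job : Int) : Prop :=
  ¬(number_pool = 0 ∧ number_pool < number_job)
instance (number_pool : Int) (number_job : Int) : Decidable (Pre_get_balanced_job number_pool number_job) := by unfold Pre_get_balanced_job; infer_instance
def pvWitness_get_balanced_job : Int × Int := (3, 10)
def Spec_get_balanced_job (number_pool : Int) (number_job : Int) (out : List Int) : Prop := out = get_balanced_job_alt number_pool number_job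
instance (number_pool : Int) (number_job : Int) (out : List Int) : Decidable (Spec_get_balanced_job number_pool number_job out) := by unfold Spec_get_balanced_job; infer_instance

-- ===== CLAIM (what is proved, stated in full; the proofs are below) =====
def Claim_equal_get_balanced_job : Prop := ∀ (number_pool : Int) (number_job : Int), Dom_get_balanced_job number_pool number_job → Pre_get_balanced_job number_pool number_job → Spec_get_balanced_job number_pool number_job (get_balanced_job number_pool number_job)

-- ===== LEMMAS AND PROOFS =====

-- appending a constant once per range element builds a replicate
theorem foldl_append_const (l : List Int) (acc : List Int) (c : Int) :
    l.foldl (fun a _ => a ++ [c]) acc = acc ++ List.replicate l.length c := by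
  induction l generalizing acc with
  | nil => simp
  | cons x xs ih => simp [List.foldl_cons, ih, List.replicate_succ]

-- A's second loop: bumping the first r entries of a constant list yields two blocks
theorem foldl_set_bump (r p : ℕ) (q : Int) (h : r ≤ p) :
    (PySem.List.pyRange 0 (r : Int) 1).foldl
      (fun acc i => acc.set i.toNat (acc.getD i.toNat 0 + 1)) (List.replicate p q) =
    List.replicate r (q + 1) ++ List.replicate (p - r) q := by
  induction r with
  | zero => simp [PySem.List.pyRange_one_eq_nil]
  | succ n ih =>
    have hn : n ≤ p := Nat.le_of_succ_le h
    have hcast : ((n + 1 : ℕ) : Int) = (n : Int) + 1 := by push_cast; ring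
    rw [hcast, PySem.List.pyRange_one_succ_right (by positivity), List.foldl_append, ih hn]
    have hsplit : p - n = (p - (n + 1)) + 1 := by omega
    simp only [List.foldl_cons, List.foldl_nil, Int.toNat_natCast]
    rw [hsplit, List.replicate_succ]
    have hget : (List.replicate n (q + 1) ++ q :: List.replicate (p - (n + 1)) q).getD n 0 = q := by
      rw [List.getD_eq_getElem?_getD, List.getElem?_append_right (by simp)]
      simp
    rw [hget, List.set_append_right _ _ (by simp)]
    simp [List.replicate_succ', List.append_assoc]

-- B's per-worker ceiling equals the two-block distribution, elementwise
theorem map_ceil_eq_blocks (p j : Int) (hp : 0 < p) (hj : p < j) :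
    (PySem.List.pyRange 0 p 1).map (fun i => -(PySem.Int.floordiv (-(j - i)) p)) =
    List.replicate (PySem.Int.mod j p).toNat (PySem.Int.floordiv j p + 1) ++
      List.replicate (p - PySem.Int.mod j p).toNat (PySem.Int.floordiv j p) := by
  have hr0 : 0 ≤ PySem.Int.mod j p := PySem.Int.mod_nonneg j hp
  have hrlt : PySem.Int.mod j p < p := PySem.Int.mod_lt j hp
  have hqr : PySem.Int.floordiv j p * p + PySem.Int.mod j p = j :=
    PySem.Int.floordiv_mul_add_mod j p
  set q := PySem.Int.floordiv j p with hq
  set r := PySem.Int.mod j p with hr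
  apply List.ext_getElem
  · simp [PySem.List.length_pyRange_one]
    omega
  · intro k hk1 hk2
    have hkp : (k : Int) < p := by
      have := hk1; simp [PySem.List.length_pyRange_one] at this; omega
    rw [List.getElem_map, PySem.List.getElem_pyRange_one]
    by_cases hkr : k < r.toNat
    · rw [List.getElem_append_left (by simpa using hkr), List.getElem_replicate]
      rw [PySem.Int.neg_floordiv_neg_eq_iff_of_pos hp]
      have hkr2 : (k : Int) < r := by omega
      constructor <;> nlinarith [hqr, hr0, hrlt, hkr2]
    · rw [List.getElem_append_right (by simpa using hkr), List.getElem_replicate]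
      rw [PySem.Int.neg_floordiv_neg_eq_iff_of_pos hp]
      have hkr' : r ≤ (k : Int) := by
        have : r.toNat ≤ k := Nat.le_of_not_lt hkr
        omega
      constructor <;> nlinarith [hqr, hr0, hrlt]

-- ===== VERDICT (by name: the statement is the Claim_ definition above) =====
theorem get_balanced_job_spec : Claim_equal_get_balanced_job := by
  intro p j _ hpre
  unfold Spec_get_balanced_job get_balanced_job get_balanced_job_alt
  by_cases hle : j ≤ p
  · simp only [if_pos hle]
    rw [foldl_append_const]
    simp [PySem.List.length_pyRange_one]
  · simp only [if_neg hle]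
    rw [not_le] at hle
    by_cases hp : 0 < p
    · -- positive pool: A's replicate-then-bump = B's ceiling map, via the two blocks
      have hj : 0 < j := lt_trans hp hle
      have hr0 : 0 ≤ PySem.Int.mod j p := PySem.Int.mod_nonneg j hp
      rw [foldl_append_const]
      have htdiv : j.tdiv p = PySem.Int.floordiv j p := by
        rw [PySem.Int.floordiv_eq_ediv_of_pos hp, Int.tdiv_eq_ediv_of_nonneg (le_of_lt hj)]
      rw [htdiv]
      have hcastr : ((PySem.Int.mod j p).toNat : Int) = PySem.Int.mod j p := Int.toNat_of_nonneg hr0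
      have hlen : (PySem.List.pyRange 0 p 1).length = p.toNat := by
        simp [PySem.List.length_pyRange_one]
      rw [hlen, List.nil_append]
      have hrlt : PySem.Int.mod j p < p := PySem.Int.mod_lt j hp
      have hbump := foldl_set_bump (PySem.Int.mod j p).toNat p.toNat (PySem.Int.floordiv j p) (by omega)
      rw [hcastr] at hbump
      have hcnt : p.toNat - (PySem.Int.mod j p).toNat = (p - PySem.Int.mod j p).toNat := by omega
      rw [hbump, hcnt, map_ceil_eq_blocks p j hp hle]
    · -- nonpositive pool (≠ 0 by Pre_): both sides are []
      have hpneg : p < 0 := by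
        rcases lt_or_eq_of_le (not_lt.mp hp) with h | h
        · exact h
        · exact absurd ⟨h, hle⟩ hpre
      have hb := PySem.Int.mod_neg_bounds j hpneg
      rw [PySem.List.pyRange_one_eq_nil (le_of_lt hpneg), PySem.List.pyRange_one_eq_nil hb.2]
      simp
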